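-- pv_equiv track=rewrite | github.com/orastean22/Python | Projects/DIAdem scrypt/DetectGlitch/detectGlitch.py | calculate_pulse_times
-- ===== SOURCE A (Python) =====
-- def calculate_pulse_times(signal_data, threshold):
--
--     pulse_start = None
--     pulse_times = []
--
--     for i, value in enumerate(signal_data):
--         # Detect rising edge
--         if value > threshold and pulse_start is None:
--             pulse_start = i
--         # Detect falling edge
--         elif value <= threshold and pulse_start is not None:
--             pulse_end = i - 1
--             pulse_times.append((pulse_start, pulse_end))
--             pulse_start = None
--
--     return pulse_times
-- ===== SOURCE B (Python) =====
-- def calculate_pulse_times(signal_data, threshold):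
--     above = [v > threshold for v in signal_data]
--     prev = [False] + above[:-1]
--     starts = [i for i, (a, p) in enumerate(zip(above, prev)) if a and not p]
--     ends = [i - 1 for i, (a, p) in enumerate(zip(above, prev)) if not a and p]
--     return list(zip(starts, ends))
-- ===== Notes on version B (the rewrite author's own statement) =====
-- stated objective: alternative
-- what changed: Replaces A's single stateful loop (optional pulse_start state machine) with an edge-mask decomposition: a boolean above-threshold mask, two comprehensions collecting rising-edge start indices and falling-edge end indices, and a zip whose truncation drops a pulse still open at the end.
import Mathlib
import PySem

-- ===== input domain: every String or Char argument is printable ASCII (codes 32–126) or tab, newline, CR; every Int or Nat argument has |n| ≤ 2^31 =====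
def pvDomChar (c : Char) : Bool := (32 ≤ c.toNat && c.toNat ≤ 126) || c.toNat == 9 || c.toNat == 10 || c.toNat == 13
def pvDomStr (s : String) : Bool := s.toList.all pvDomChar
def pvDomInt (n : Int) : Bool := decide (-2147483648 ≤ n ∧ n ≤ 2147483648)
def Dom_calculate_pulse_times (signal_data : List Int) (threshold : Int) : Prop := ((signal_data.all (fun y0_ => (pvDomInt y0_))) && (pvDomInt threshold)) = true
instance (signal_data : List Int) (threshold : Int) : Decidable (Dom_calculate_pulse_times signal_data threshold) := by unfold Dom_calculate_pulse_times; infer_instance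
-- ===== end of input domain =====

-- B replaces A's single stateful loop by an edge-mask decomposition (rising-edge
-- starts, falling-edge ends, zipped); objective: alternative decomposition, same cost.

-- ===== PORT A =====
-- A's loop body: state = (pulse_start : Option Int, pulse_times accumulator)
def pvStepA (threshold : Int) (st : Option Int × List (Int × Int)) (iv : Int × Int) :
    Option Int × List (Int × Int) :=
  if iv.2 > threshold ∧ st.1 = none then (some iv.1, st.2)
  else if iv.2 ≤ threshold ∧ st.1 ≠ none then (none, st.2 ++ [(st.1.getD 0, iv.1 - 1)])
  else st

def calculate_pulse_times (signal_data : List Int) (threshold : Int) : List (Int × Int) :=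
  ((PySem.List.enumerate signal_data 0).foldl (pvStepA threshold) (none, [])).2

-- ===== PORT B =====
def calculate_pulse_times_alt (signal_data : List Int) (threshold : Int) : List (Int × Int) :=
  let above := signal_data.map (fun v => decide (v > threshold))
  let prev := false :: above.dropLast
  let pairs := PySem.List.enumerate (above.zip prev) 0
  let starts := pairs.filterMap (fun ip => if ip.2.1 && !ip.2.2 then some ip.1 else none)
  let ends := pairs.filterMap (fun ip => if !ip.2.1 && ip.2.2 then some (ip.1 - 1) else none)
  starts.zip ends

-- ===== PRECONDITION & SPEC =====
def Spec_calculate_pulse_times (signal_data : List Int) (threshold : Int) (out : List (Int × Int)) : Prop := out = calculate_pulse_times_alt signal_data threshold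
instance (signal_data : List Int) (threshold : Int) (out : List (Int × Int)) : Decidable (Spec_calculate_pulse_times signal_data threshold out) := by unfold Spec_calculate_pulse_times; infer_instance

-- ===== CLAIM (what is proved, stated in full; the proofs are below) =====
def Claim_equal_calculate_pulse_times : Prop := ∀ (signal_data : List Int) (threshold : Int), Dom_calculate_pulse_times signal_data threshold → Spec_calculate_pulse_times signal_data threshold (calculate_pulse_times signal_data threshold)

-- ===== LEMMAS AND PROOFS =====

-- rising-edge indices of l (indices from i, previous-sample-above flag p)
def pvStarts (l : List Int) (thr i : Int) (p : Bool) : List Int :=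
  match l with
  | [] => []
  | v :: l' => (if v > thr ∧ p = false then [i] else []) ++ pvStarts l' thr (i + 1) (decide (v > thr))

-- falling-edge end indices of l
def pvEnds (l : List Int) (thr i : Int) (p : Bool) : List Int :=
  match l with
  | [] => []
  | v :: l' => (if ¬ v > thr ∧ p = true then [i - 1] else []) ++ pvEnds l' thr (i + 1) (decide (v > thr))

-- A's fold computes the zip of rising-edge starts and falling-edge ends
theorem pvLoopA_eq (thr : Int) : ∀ (l : List Int) (i : Int) (st : Option Int × List (Int × Int)),
    ((PySem.List.enumerate l i).foldl (pvStepA thr) st).2 =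
      st.2 ++ (match st.1 with
        | none => (pvStarts l thr i false).zip (pvEnds l thr i false)
        | some s => (s :: pvStarts l thr i true).zip (pvEnds l thr i true)) := by
  intro l
  induction l with
  | nil => intro i st; cases st with
    | mk o acc => cases o <;> simp [PySem.List.enumerate_nil, pvStarts, pvEnds]
  | cons v l ih =>
    intro i st
    cases st with
    | mk o acc =>
      rw [PySem.List.enumerate_cons, List.foldl_cons]
      cases o with
      | none =>
        by_cases hv : v > thr
        · simp only [pvStepA]
          rw [if_pos (by simp [hv]), ih]
          simp [pvStarts, pvEnds, hv]
        · have hv' : v ≤ thr := le_of_not_gt hv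
          simp only [pvStepA]
          rw [if_neg (by simp [hv]), if_neg (by simp), ih]
          simp [pvStarts, pvEnds, hv]
      | some s =>
        by_cases hv : v > thr
        · simp only [pvStepA]
          rw [if_neg (by simp), if_neg (by simp [not_le.mpr hv]), ih]
          simp [pvStarts, pvEnds, hv]
        · have hv' : v ≤ thr := le_of_not_gt hv
          simp only [pvStepA]
          rw [if_neg (by simp [hv]), if_pos (by simp [hv']), ih]
          simp [pvStarts, pvEnds, hv, List.append_assoc]

-- zipping the boolean mask with its shifted copy steps structurally
theorem pvZipShift {α : Type} (a : α) (as : List α) (p : α) :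
    (a :: as).zip (p :: (a :: as).dropLast) = (a, p) :: as.zip (a :: as.dropLast) := by
  cases as <;> simp [List.zip]

-- B's starts comprehension computes pvStarts
theorem pvStartsB_eq (thr : Int) : ∀ (l : List Int) (i : Int) (p : Bool),
    (PySem.List.enumerate ((l.map (fun v => decide (v > thr))).zip
        (p :: (l.map (fun v => decide (v > thr))).dropLast)) i).filterMap
      (fun ip => if ip.2.1 && !ip.2.2 then some ip.1 else none) = pvStarts l thr i p := by
  intro l
  induction l with
  | nil => intro i p; simp [PySem.List.enumerate_nil, pvStarts]
  | cons v l ih =>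
    intro i p
    rw [List.map_cons, pvZipShift, PySem.List.enumerate_cons, List.filterMap_cons]
    by_cases hv : v > thr
    · rw [decide_eq_true hv]
      cases p <;> simp [pvStarts, hv] <;> simpa using ih (i + 1) true
    · rw [decide_eq_false hv]
      cases p <;> simp [pvStarts, hv] <;> simpa using ih (i + 1) false

-- B's ends comprehension computes pvEnds
theorem pvEndsB_eq (thr : Int) : ∀ (l : List Int) (i : Int) (p : Bool),
    (PySem.List.enumerate ((l.map (fun v => decide (v > thr))).zip
        (p :: (l.map (fun v => decide (v > thr))).dropLast)) i).filterMap
      (fun ip => if !ip.2.1 && ip.2.2 then some (ip.1 - 1) else none) = pvEnds l thr i p := by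
  intro l
  induction l with
  | nil => intro i p; simp [PySem.List.enumerate_nil, pvEnds]
  | cons v l ih =>
    intro i p
    rw [List.map_cons, pvZipShift, PySem.List.enumerate_cons, List.filterMap_cons]
    by_cases hv : v > thr
    · rw [decide_eq_true hv]
      cases p <;> simp [pvEnds, hv] <;> simpa using ih (i + 1) true
    · rw [decide_eq_false hv]
      cases p <;> simp [pvEnds, hv] <;> simpa using ih (i + 1) false

-- ===== VERDICT (by name: the statement is the Claim_ definition above) =====
theorem calculate_pulse_times_spec : Claim_equal_calculate_pulse_times := by
  intro signal_data threshold _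
  have hB : calculate_pulse_times_alt signal_data threshold =
      (pvStarts signal_data threshold 0 false).zip (pvEnds signal_data threshold 0 false) := by
    simp only [calculate_pulse_times_alt]
    rw [pvStartsB_eq, pvEndsB_eq]
  unfold Spec_calculate_pulse_times calculate_pulse_times
  rw [pvLoopA_eq, hB]
  simp
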